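-- pv_equiv track=rewrite | github.com/BD20171998/Data-Structures-and-Algorithms-Practice | Binarysearch.io/K Unique String.py | solve
-- ===== SOURCE A (Python) =====
-- from collections import Counter
--
-- def solve(s, k):
--
--     letters = {}
--
--     for i in s:
--         if i in letters:
--             letters[i] += 1
--         else:
--             letters[i] = 1
--
--     h = Counter(letters)
--     top = h.most_common(k)
--     tops = {}
--
--     for a, b in top:
--         tops.setdefault(a, b)
--     x = 0
--     for key, val in letters.items():
--         if key not in tops.keys():
--             x += letters[key]
--
--     return(x)
-- ===== SOURCE B (Python) =====
-- def solve(s, k):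
--     counts = sorted((s.count(c) for c in set(s)), reverse=True)
--     return sum(counts[max(k, 0):])
-- ===== Notes on version B (the rewrite author's own statement) =====
-- stated objective: simpler
-- what changed: B drops the hash-map counting and most_common machinery entirely: it counts each distinct character directly with s.count over set(s), sorts the bag of counts descending, and sums the slice past the first k -- no Counter, no top-k key set, no filtered re-scan; correct because the answer depends only on the multiset of counts.
import Mathlib
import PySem

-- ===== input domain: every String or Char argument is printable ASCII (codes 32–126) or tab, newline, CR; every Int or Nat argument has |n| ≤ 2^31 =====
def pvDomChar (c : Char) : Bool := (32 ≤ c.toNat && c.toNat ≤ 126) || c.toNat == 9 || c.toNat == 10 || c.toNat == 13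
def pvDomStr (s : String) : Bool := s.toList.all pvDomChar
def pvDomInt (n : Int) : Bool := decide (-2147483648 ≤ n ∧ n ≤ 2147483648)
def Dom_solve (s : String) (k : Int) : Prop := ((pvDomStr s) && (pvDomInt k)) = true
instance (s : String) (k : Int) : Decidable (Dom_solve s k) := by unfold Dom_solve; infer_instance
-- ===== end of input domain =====

-- B replaces A's "Counter, most_common(k), set of top-k keys, filtered re-scan" by:
-- count each distinct character directly (s.count over set(s)), sort the bag of counts
-- descending, and sum the slice past the first k (objective: simpler; no speed claim).

-- ===== PORT A =====
-- Counter.most_common(k): sorted by count descending (stable, insertion order on ties),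
-- first k entries; for k <= 0 heapq.nlargest returns [] (exact Python behaviour).
def mostCommon (d : PySem.Dict Char Int) (k : Int) : List (Char × Int) :=
  if k ≤ 0 then [] else (PySem.List.sorted d.items (fun p => p.2) true).take k.toNat

def solve (s : String) (k : Int) : Int :=
  let letters := s.toList.foldl
    (fun d i => if d.contains i then d.modify i 0 (· + 1) else d.insert i 1)
    PySem.Dict.empty
  -- h = Counter(letters): same items in the same order as letters
  let h := letters
  let top := mostCommon h k
  let tops := top.foldl (fun d p => d.setdefault p.1 p.2) PySem.Dict.empty
  -- letters[key] is exact as getD: key comes from letters.items, so it is present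
  let x := letters.items.foldl
    (fun x p => if !(tops.contains p.1) then x + letters.getD p.1 0 else x) 0
  x

-- ===== PORT B =====
def solve_alt (s : String) (k : Int) : Int :=
  let counts := PySem.List.sorted
    ((PySem.Set.ofList s.toList).map (fun c => (PySem.Str.count s (String.ofList [c]) : Int)))
    (fun x => x) true
  (PySem.List.slice counts (some (max k 0)) none).sum

-- ===== PRECONDITION & SPEC =====
def Spec_solve (s : String) (k : Int) (out : Int) : Prop := out = solve_alt s k
instance (s : String) (k : Int) (out : Int) : Decidable (Spec_solve s k out) := by unfold Spec_solve; infer_instance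

-- ===== CLAIM (what is proved, stated in full; the proofs are below) =====
def Claim_equal_solve : Prop := ∀ (s : String) (k : Int), Dom_solve s k → Spec_solve s k (solve s k)

-- ===== LEMMAS AND PROOFS =====

-- A's manual counting loop builds exactly Counter(s)
lemma count_step_eq (d : PySem.Dict Char Int) (x : Char) :
    (if d.contains x then d.modify x 0 (· + 1) else d.insert x 1) = d.modify x 0 (· + 1) := by
  cases hc : d.contains x
  · simp [PySem.Dict.modify, PySem.Dict.getD_of_not_contains d 0 hc]
  · simp [PySem.Dict.modify]

lemma lettersA_eq (l : List Char) :
    l.foldl (fun d i => if d.contains i then d.modify i 0 (· + 1) else d.insert i 1)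
      PySem.Dict.empty = PySem.Dict.counter l := by
  simp only [count_step_eq]
  rfl

-- membership in the setdefault-built dict = membership among the top keys
lemma contains_foldl_setdefault (t : List (Char × Int)) (d : PySem.Dict Char Int) (c : Char) :
    (t.foldl (fun d p => d.setdefault p.1 p.2) d).contains c
      = (d.contains c || decide (c ∈ t.map Prod.fst)) := by
  induction t generalizing d with
  | nil => simp
  | cons p t ih =>
      simp only [List.foldl_cons, ih, PySem.Dict.contains_setdefault, List.map_cons,
        List.mem_cons]
      cases hc : d.contains c <;> by_cases h1 : c = p.1 <;> simp [h1]

lemma foldl_if_add (l : List (Char × Int)) (Q : Char × Int → Bool) (a : Int) :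
    l.foldl (fun x p => if Q p then x + p.2 else x) a
      = a + ((l.filter Q).map Prod.snd).sum := by
  induction l generalizing a with
  | nil => simp
  | cons p l ih =>
      cases hq : Q p <;> simp [hq, ih]
      ring

lemma foldl_add_snd (l : List (Char × Int)) (a : Int) :
    l.foldl (fun acc p => acc + p.2) a = a + (l.map Prod.snd).sum := by
  induction l generalizing a with
  | nil => simp
  | cons p l ih => simp [ih]; ring

-- filtering a nodup-keyed list down to the keys of one of its sublists returns that sublist
lemma filter_sublist_eq {t l : List (Char × Int)} (hs : t.Sublist l)
    (hnd : (l.map Prod.fst).Nodup) :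
    l.filter (fun p => decide (p.1 ∈ t.map Prod.fst)) = t := by
  induction hs with
  | slnil => simp
  | @cons t₁ l₁ a hs ih =>
      simp only [List.map_cons, List.nodup_cons] at hnd
      have hat : a.1 ∉ t₁.map Prod.fst := fun hm => hnd.1 ((hs.map Prod.fst).mem hm)
      rw [List.filter_cons_of_neg (by simpa using hat), ih hnd.2]
  | @cons₂ t₁ l₁ a hs ih =>
      simp only [List.map_cons, List.nodup_cons] at hnd
      rw [List.filter_cons_of_pos (by simp)]
      congr 1
      rw [List.filter_congr (q := fun p => decide (p.1 ∈ t₁.map Prod.fst))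
        (fun p hp => by
          have hne : p.1 ≠ a.1 := fun he => hnd.1 (he ▸ List.mem_map_of_mem hp)
          simp [List.mem_cons, hne]), ih hnd.2]

-- A's final loop = total of all counts minus the sum of the top-k counts
lemma main_sum (L : PySem.Dict Char Int) (k : Int) (hnd : L.keys.Nodup) :
    L.items.foldl
      (fun x p => if !(decide (p.1 ∈ (mostCommon L k).map Prod.fst)) then x + L.getD p.1 0 else x) 0
    = L.values.foldl (· + ·) 0 - (mostCommon L k).foldl (fun acc p => acc + p.2) 0 := by
  set T := mostCommon L k with hT
  have hndf : (L.items.map Prod.fst).Nodup := hnd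
  have hTsub : T.Subperm L.items := by
    rw [hT]; unfold mostCommon
    split
    · simp
    · exact ((List.take_sublist _ _).subperm).trans
        (PySem.List.sorted_perm L.items (fun p => p.2) true).subperm
  obtain ⟨t', hpt, hsl⟩ := hTsub
  have hfe : L.items.filter (fun p => decide (p.1 ∈ T.map Prod.fst)) = t' := by
    rw [List.filter_congr (q := fun p => decide (p.1 ∈ t'.map Prod.fst))
      (fun p _ => by simp [(hpt.map Prod.fst).mem_iff])]
    exact filter_sublist_eq hsl hndf
  have hgd : L.items.foldl
      (fun x p => if !(decide (p.1 ∈ T.map Prod.fst)) then x + L.getD p.1 0 else x) 0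
      = L.items.foldl (fun x p => if !(decide (p.1 ∈ T.map Prod.fst)) then x + p.2 else x) 0 :=
    PySem.List.foldl_congr_mem _ _ _ _
      (fun acc p hp => by rw [PySem.Dict.getD_of_mem_items L (by simpa using hp) hnd 0])
  rw [hgd, foldl_if_add]
  have hvals : L.values.foldl (· + ·) 0 = 0 + (L.items.map Prod.snd).sum := by
    show (L.items.map Prod.snd).foldl (· + ·) 0 = _
    rw [← List.sum_eq_foldl]; ring
  rw [hvals, foldl_add_snd]
  have hsplit := ((List.filter_append_perm
      (fun p => decide (p.1 ∈ T.map Prod.fst)) L.items).map Prod.snd).sum_eq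
  simp only [List.map_append, List.sum_append] at hsplit
  have htop : ((L.items.filter (fun p => decide (p.1 ∈ T.map Prod.fst))).map Prod.snd).sum
      = (T.map Prod.snd).sum := by
    rw [hfe]; exact (hpt.map Prod.snd).sum_eq
  omega

-- str.count with a one-character needle counts occurrences of that character
lemma count_go_singleton (c : Char) (l : List Char) (acc fuel : Nat) (h : l.length ≤ fuel) :
    PySem.Chars.count.go [c] fuel l acc = acc + l.count c := by
  induction l generalizing fuel acc with
  | nil => cases fuel <;> simp only [PySem.Chars.count.go, List.count_nil, Nat.add_zero]
  | cons hd t ih =>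
      cases fuel with
      | zero => exact absurd h (by simp)
      | succ f =>
          have hf : t.length ≤ f := by simpa using h
          have hpre : ([c].isPrefixOf (hd :: t)) = (c == hd) := by
            simp [List.isPrefixOf]
          simp only [PySem.Chars.count.go, hpre]
          by_cases hc : c = hd
          · rw [if_pos (by simp [hc])]
            simp only [List.length_cons, List.length_nil, Nat.zero_add, List.drop_succ_cons,
              List.drop_zero]
            rw [ih _ _ hf]
            simp only [List.count_cons, hc]
            simp
            omega
          · rw [if_neg (by simp [hc])]
            rw [ih _ _ hf]
            have : (hd == c) = false := by simp [Ne.symm hc]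
            simp [List.count_cons, this]
lemma str_count_singleton (s : String) (c : Char) :
    (PySem.Str.count s (String.ofList [c]) : Int) = (s.toList.count c : Int) := by
  have h2 : PySem.Str.count s (String.ofList [c]) = s.toList.count c := by
    have h0 : (String.ofList [c]).toList = [c] := by simp
    rw [PySem.Str.count_eq, h0, PySem.Chars.count]
    rw [if_neg (by simp)]
    rw [count_go_singleton c s.toList 0 s.toList.length le_rfl]
    exact Nat.zero_add _
  rw [h2]

-- the list B sorts is exactly Counter(s).values
lemma counts_eq_values (s : String) :
    (PySem.Set.ofList s.toList).map (fun c => (PySem.Str.count s (String.ofList [c]) : Int))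
      = (PySem.Dict.counter s.toList).values := by
  rw [PySem.Dict.values_eq_map_keys _ (PySem.Dict.nodup_keys_counter s.toList) 0,
      PySem.Dict.keys_counter]
  exact List.map_congr_left fun c _ => by
    rw [str_count_singleton, PySem.Dict.getD_counter]

-- sorting the items by count (desc) and projecting = sorting the values (desc)
lemma map_snd_sorted_items (L : PySem.Dict Char Int) :
    (PySem.List.sorted L.items (fun p => p.2) true).map Prod.snd
      = PySem.List.sorted L.values (fun x => x) true := by
  have hperm : ((PySem.List.sorted L.items (fun p => p.2) true).map Prod.snd).Perm
      (PySem.List.sorted L.values (fun x => x) true) := by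
    refine ((PySem.List.sorted_perm L.items (fun p => p.2) true).map Prod.snd).trans ?_
    exact (PySem.List.sorted_perm L.values (fun x => x) true).symm
  exact List.Perm.eq_of_pairwise (le := fun a b : Int => b ≤ a)
    (fun _ _ _ _ h1 h2 => le_antisymm h2 h1)
    (List.pairwise_map.mpr (PySem.List.sorted_pairwise_rev L.items (fun p => p.2)))
    (PySem.List.sorted_pairwise_rev L.values (fun x => x))
    hperm

lemma sum_drop_eq (l : List Int) (n : Nat) :
    (l.drop n).sum = l.sum - (l.take n).sum := by
  calc (l.drop n).sum = (l.take n ++ l.drop n).sum - (l.take n).sum := by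
        rw [List.sum_append]; ring
    _ = l.sum - (l.take n).sum := by rw [List.take_append_drop]

-- ===== VERDICT (by name: the statement is the Claim_ definition above) =====
theorem solve_spec : Claim_equal_solve := by
  intro s k _
  unfold Spec_solve solve solve_alt
  simp only [lettersA_eq, contains_foldl_setdefault, PySem.Dict.contains_empty,
    Bool.false_or]
  rw [main_sum (PySem.Dict.counter s.toList) k (PySem.Dict.nodup_keys_counter s.toList)]
  rw [counts_eq_values]
  set L := PySem.Dict.counter s.toList with hL
  have hslice : PySem.List.slice (PySem.List.sorted L.values (fun x => x) true)
      (some (max k 0)) none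
      = (PySem.List.sorted L.values (fun x => x) true).drop (max k 0).toNat :=
    PySem.List.slice_from _ (le_max_right k 0)
  rw [hslice, sum_drop_eq]
  have hperm : (PySem.List.sorted L.values (fun x => x) true).sum = L.values.sum :=
    (PySem.List.sorted_perm L.values (fun x => x) true).sum_eq
  have hvals : L.values.foldl (· + ·) 0
      = (PySem.List.sorted L.values (fun x => x) true).sum :=
    List.sum_eq_foldl.symm.trans hperm.symm
  rw [hvals]
  by_cases hk : k ≤ 0
  · simp [mostCommon, hk]
  · have hmk : (max k 0).toNat = k.toNat := by omega
    rw [hmk]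
    unfold mostCommon
    rw [if_neg hk, foldl_add_snd, List.map_take, map_snd_sorted_items]
    ring
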